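-- pv_equiv track=rewrite | github.com/cdccnleo/RQA2025 | refactor_test_files.py | extract_class_definitions
-- ===== SOURCE A (Python) =====
-- def extract_class_definitions(content: str):
--     """提取类定义及其范围"""
--     lines = content.split('\n')
--     classes = []
--     in_class = False
--     class_start = 0
--     current_class = ""
--     indent_level = 0
--
--     for i, line in enumerate(lines):
--         stripped = line.strip()
--
--         # 查找类定义开始
--         if stripped.startswith('class '):
--             if in_class:
--                 # 结束之前的类
--                 classes.append((current_class, class_start, i-1))
--
--             current_class = stripped.split('class ')[1].split('(')[0].split(':')[0].strip()
--             class_start = i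
--             in_class = True
--             indent_level = len(line) - len(line.lstrip())
--
--         elif in_class:
--             # 检查是否到达类结束
--             if stripped and not line.startswith(' ') and not line.startswith('\t') and not stripped.startswith('#'):
--                 current_indent = len(line) - len(line.lstrip())
--                 if current_indent <= indent_level:
--                     classes.append((current_class, class_start, i-1))
--                     in_class = False
--                     current_class = ""
--                     class_start = 0
--
--     # 处理最后一个类
--     if in_class:
--         classes.append((current_class, class_start, len(lines)-1))
--
--     return classes
-- ===== SOURCE B (Python) =====
-- def extract_class_definitions(content: str):
--     """提取类定义及其范围 (collect headers first, then resolve each class's end)"""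
--     lines = content.split('\n')
--
--     # Phase 1: collect every class header (index, name, indent) in one pass.
--     headers = []
--     for i, line in enumerate(lines):
--         stripped = line.strip()
--         if stripped.startswith('class '):
--             name = stripped.split('class ')[1].split('(')[0].split(':')[0].strip()
--             headers.append((i, name, len(line) - len(line.lstrip())))
--
--     # Phase 2: resolve each header's end line independently.
--     limits = [h[0] for h in headers[1:]] + [len(lines)]
--     result = []
--     for (i, name, indent), limit in zip(headers, limits):
--         end = limit - 1
--         for j in range(i + 1, limit):
--             line = lines[j]
--             s = line.strip()
--             if (s and not line.startswith(' ') and not line.startswith('\t')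
--                     and not s.startswith('#')
--                     and len(line) - len(line.lstrip()) <= indent):
--                 end = j - 1
--                 break
--         result.append((name, i, end))
--     return result
-- ===== Notes on version B (the rewrite author's own statement) =====
-- stated objective: alternative
-- what changed: Replaces A's single-pass in_class/class_start/indent_level state machine with a two-phase collect-then-resolve: first gather all class headers (index, name, indent), then resolve each class's end line by an independent forward scan bounded by the next header.
import Mathlib
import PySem

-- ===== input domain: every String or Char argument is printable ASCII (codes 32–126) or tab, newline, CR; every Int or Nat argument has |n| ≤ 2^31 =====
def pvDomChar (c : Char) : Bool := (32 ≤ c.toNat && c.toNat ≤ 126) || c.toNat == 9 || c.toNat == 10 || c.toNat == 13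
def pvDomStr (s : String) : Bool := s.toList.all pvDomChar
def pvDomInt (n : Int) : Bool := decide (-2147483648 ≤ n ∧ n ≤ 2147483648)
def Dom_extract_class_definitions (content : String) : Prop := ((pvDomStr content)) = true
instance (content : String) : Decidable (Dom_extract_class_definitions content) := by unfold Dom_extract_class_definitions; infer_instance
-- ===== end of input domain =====

-- B replaces A's single-pass in_class state machine by collect-then-resolve: gather all class
-- headers first, then resolve each class's end line by an independent bounded forward scan
-- (objective: alternative decomposition, same cost).

-- ===== PORT A =====
-- s.split(sep) for a nonempty literal sep: split? is always 'some' there, so getD never fires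
def pvSplit (s : String) (sep : String) : List String := (PySem.Str.split? s sep).getD []

-- shared name-extraction chain: stripped.split('class ')[1].split('(')[0].split(':')[0].strip()
-- (the [1] / [0] indexings are ported with pyGetD; they are always in range because the list
-- returned by split is nonempty resp. has ≥ 2 parts when stripped starts with 'class ')
def pvNameOf (stripped : String) : String :=
  PySem.Str.strip
    (PySem.List.pyGetD
      (pvSplit
        (PySem.List.pyGetD
          (pvSplit (PySem.List.pyGetD (pvSplit stripped "class ") 1 "") "(")
          0 "")
        ":")
      0 "")

-- len(line) - len(line.lstrip())
def pvIndentOf (line : String) : Int :=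
  PySem.Str.len line - PySem.Str.len (PySem.Str.lstrip line)

-- the for-loop of A, state = (classes, in_class, class_start, current_class, indent_level)
def pvALoop : List (Int × String) → List (String × Int × Int) × Bool × Int × String × Int →
    List (String × Int × Int) × Bool × Int × String × Int
  | [], st => st
  | (i, line) :: rest, (classes, in_class, class_start, current_class, indent_level) =>
    let stripped := PySem.Str.strip line
    if PySem.Str.startswith stripped "class " then
      let classes' := if in_class then classes ++ [(current_class, class_start, i - 1)] else classes
      pvALoop rest (classes', true, i, pvNameOf stripped, pvIndentOf line)
    else if in_class then
      if stripped ≠ "" && !PySem.Str.startswith line " " && !PySem.Str.startswith line "\t"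
          && !PySem.Str.startswith stripped "#" then
        if pvIndentOf line ≤ indent_level then
          pvALoop rest (classes ++ [(current_class, class_start, i - 1)], false, 0, "", indent_level)
        else
          pvALoop rest (classes, in_class, class_start, current_class, indent_level)
      else
        pvALoop rest (classes, in_class, class_start, current_class, indent_level)
    else
      pvALoop rest (classes, in_class, class_start, current_class, indent_level)

def extract_class_definitions (content : String) : List (String × Int × Int) :=
  let lines := pvSplit content "\n"
  match pvALoop (PySem.List.enumerate lines 0) ([], false, 0, "", 0) with
  | (classes, in_class, class_start, current_class, _) =>
    if in_class then classes ++ [(current_class, class_start, PySem.List.len lines - 1)]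
    else classes

-- ===== PORT B =====
-- the inner scan of phase 2: first j in js whose line terminates a class at this indent, j-1; else dflt
def pvBFindEnd (lines : List String) (indent : Int) (js : List Int) (dflt : Int) : Int :=
  match js with
  | [] => dflt
  | j :: rest =>
    let line := PySem.List.pyGetD lines j ""
    let s := PySem.Str.strip line
    if s ≠ "" && !PySem.Str.startswith line " " && !PySem.Str.startswith line "\t"
        && !PySem.Str.startswith s "#" && pvIndentOf line ≤ indent then
      j - 1
    else pvBFindEnd lines indent rest dflt

def extract_class_definitions_alt (content : String) : List (String × Int × Int) :=
  let lines := pvSplit content "\n"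
  -- phase 1: collect headers (i, name, indent)
  let headers := (PySem.List.enumerate lines 0).filterMap (fun p =>
    let stripped := PySem.Str.strip p.2
    if PySem.Str.startswith stripped "class " then some (p.1, pvNameOf stripped, pvIndentOf p.2)
    else none)
  -- phase 2: resolve each header's end independently, bounded by the next header
  let limits := (headers.drop 1).map (·.1) ++ [PySem.List.len lines]
  (headers.zip limits).map (fun q =>
    (q.1.2.1, q.1.1, pvBFindEnd lines q.1.2.2 (PySem.List.pyRange (q.1.1 + 1) q.2 1) (q.2 - 1)))

-- ===== PRECONDITION & SPEC =====
-- A raises on no input (both str.split separators are nonempty literals): no Pre_ is needed.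
def Spec_extract_class_definitions (content : String) (out : List (String × Int × Int)) : Prop := out = extract_class_definitions_alt content
instance (content : String) (out : List (String × Int × Int)) : Decidable (Spec_extract_class_definitions content out) := by unfold Spec_extract_class_definitions; infer_instance

-- ===== CLAIM (what is proved, stated in full; the proofs are below) =====
def Claim_equal_extract_class_definitions : Prop := ∀ (content : String), Dom_extract_class_definitions content → Spec_extract_class_definitions content (extract_class_definitions content)

-- ===== LEMMAS AND PROOFS =====

-- proof-side abbreviations for the two line tests
def pvIsHeader (line : String) : Bool := PySem.Str.startswith (PySem.Str.strip line) "class "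

def pvTerm (line : String) (il : Int) : Bool :=
  PySem.Str.strip line ≠ "" && !PySem.Str.startswith line " " && !PySem.Str.startswith line "\t"
    && !PySem.Str.startswith (PySem.Str.strip line) "#" && pvIndentOf line ≤ il

-- A's loop, rewritten to emit its output forward (no accumulator), trailing append folded in
def pvAEmit (total : Int) : List (Int × String) → Bool → Int → String → Int → List (String × Int × Int)
  | [], inc, cs, cc, _ => if inc then [(cc, cs, total - 1)] else []
  | (i, line) :: rest, inc, cs, cc, il =>
    if pvIsHeader line then
      (if inc then [(cc, cs, i - 1)] else [])
        ++ pvAEmit total rest true i (pvNameOf (PySem.Str.strip line)) (pvIndentOf line)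
    else if inc && pvTerm line il then
      (cc, cs, i - 1) :: pvAEmit total rest false 0 "" il
    else
      pvAEmit total rest inc cs cc il

def pvPost (total : Int) (st : List (String × Int × Int) × Bool × Int × String × Int) :
    List (String × Int × Int) :=
  if st.2.1 then st.1 ++ [(st.2.2.2.1, st.2.2.1, total - 1)] else st.1

-- B's phase-1 header collection and phase-2 resolution, as functions of the enumerated lines
def pvHdrs (ps : List (Int × String)) : List (Int × String × Int) :=
  ps.filterMap (fun p =>
    if pvIsHeader p.2 then some (p.1, pvNameOf (PySem.Str.strip p.2), pvIndentOf p.2) else none)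

def pvBRes (lines : List String) (total : Int) (hs : List (Int × String × Int)) :
    List (String × Int × Int) :=
  (hs.zip ((hs.drop 1).map (·.1) ++ [total])).map (fun q =>
    (q.1.2.1, q.1.1, pvBFindEnd lines q.1.2.2 (PySem.List.pyRange (q.1.1 + 1) q.2 1) (q.2 - 1)))

-- index of the first header among ps, or total if there is none
def pvLimit (total : Int) : List (Int × String) → Int
  | [] => total
  | (i, line) :: rest => if pvIsHeader line then i else pvLimit total rest

lemma pvALoop_emit (total : Int) (ps : List (Int × String)) :
    ∀ classes inc cs cc il,
      pvPost total (pvALoop ps (classes, inc, cs, cc, il)) =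
        classes ++ pvAEmit total ps inc cs cc il := by
  induction ps with
  | nil =>
    intro classes inc cs cc il
    cases inc <;> simp [pvALoop, pvAEmit, pvPost]
  | cons p rest ih =>
    obtain ⟨i, line⟩ := p
    intro classes inc cs cc il
    simp only [pvALoop, pvAEmit, pvIsHeader]
    split_ifs with h1 h2 h3 h4 h5 <;> rw [ih] <;> simp_all [pvTerm] <;> omega

lemma pvBFindEnd_cons (lines : List String) (il : Int) (j : Int) (js : List Int) (d : Int) :
    pvBFindEnd lines il (j :: js) d =
      if pvTerm (PySem.List.pyGetD lines j "") il then j - 1 else pvBFindEnd lines il js d := by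
  simp [pvBFindEnd, pvTerm]

lemma pvBRes_cons (lines : List String) (total : Int) (i : Int) (nm : String) (ind : Int)
    (rest : List (Int × String × Int)) :
    pvBRes lines total ((i, nm, ind) :: rest) =
      (nm, i, pvBFindEnd lines ind
          (PySem.List.pyRange (i + 1) (match rest with | [] => total | h :: _ => h.1) 1)
          ((match rest with | [] => total | h :: _ => h.1) - 1)) :: pvBRes lines total rest := by
  cases rest <;> simp [pvBRes]

lemma pvLimit_eq_head (total : Int) (ps : List (Int × String)) :
    (match pvHdrs ps with | [] => total | h :: _ => h.1) = pvLimit total ps := by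
  induction ps with
  | nil => simp [pvHdrs, pvLimit]
  | cons p rest ih =>
    obtain ⟨i, line⟩ := p
    by_cases hh : pvIsHeader line <;> simp [pvHdrs, pvLimit, hh] <;> simpa [pvHdrs] using ih

lemma pvLimit_ge (total : Int) : ∀ (d : List String) (k : Int),
    k + d.length ≤ total → k ≤ pvLimit total (PySem.List.enumerate d k) := by
  intro d
  induction d with
  | nil => intro k hk; simpa [pvLimit, PySem.List.enumerate_nil] using (by omega : k ≤ total)
  | cons l d' ih =>
    intro k hk
    rw [PySem.List.enumerate_cons]
    by_cases hh : pvIsHeader l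
    · simp [pvLimit, hh]
    · simp only [pvLimit, hh, Bool.false_eq_true, if_false]
      have := ih (k + 1) (by push_cast [List.length_cons] at hk ⊢; omega)
      omega

lemma pvMain (L : List String) : ∀ (d : List String) (k : Nat), k ≤ L.length → L.drop k = d →
    ∀ inc cs cc il,
      pvAEmit (L.length : Int) (PySem.List.enumerate d (k : Int)) inc cs cc il =
        (if inc then
          [(cc, cs,
            pvBFindEnd L il
              (PySem.List.pyRange (k : Int) (pvLimit (L.length : Int) (PySem.List.enumerate d (k : Int))) 1)
              (pvLimit (L.length : Int) (PySem.List.enumerate d (k : Int)) - 1))]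
         else [])
        ++ pvBRes L (L.length : Int) (pvHdrs (PySem.List.enumerate d (k : Int))) := by
  intro d
  induction d with
  | nil =>
    intro k hk hd inc cs cc il
    have hkl : k = L.length := by
      have := List.drop_eq_nil_iff.mp hd
      omega
    cases inc <;>
      simp [PySem.List.enumerate_nil, pvAEmit, pvHdrs, pvBRes, pvLimit, hkl, pvBFindEnd]
  | cons l d' ih =>
    intro k hk hd inc cs cc il
    have hklt : k < L.length := by
      by_contra h
      have hnil : L.drop k = [] := List.drop_eq_nil_iff.mpr (by omega)
      rw [hd] at hnil
      exact List.cons_ne_nil _ _ hnil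
    have hd' : L.drop (k + 1) = d' := by
      have h1 : L.drop (k + 1) = (L.drop k).drop 1 := by
        rw [List.drop_drop]
      rw [h1, hd]; rfl
    have hget : L[k]? = some l := by
      have h0 : (L.drop k)[0]? = some l := by rw [hd]; rfl
      rw [List.getElem?_drop] at h0; simpa using h0
    have hgetD : PySem.List.pyGetD L ((k : Int)) "" = l := by
      rw [PySem.List.pyGetD_natCast]
      simp [List.getD_eq_getElem?_getD, hget]
    have hcast : ((k + 1 : Nat) : Int) = (k : Int) + 1 := by push_cast; ring
    have ihh := ih (k + 1) (by omega) hd'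
    rw [hcast] at ihh
    rw [PySem.List.enumerate_cons]
    by_cases hh : pvIsHeader l = true
    · -- header line at index k
      have hr : PySem.List.pyRange (k : Int) ((k : Int)) 1 = [] :=
        PySem.List.pyRange_one_eq_nil (by omega)
      have hlim := pvLimit_eq_head (L.length : Int) (PySem.List.enumerate d' ((k : Int) + 1))
      simp only [pvAEmit, pvIsHeader] at hh ⊢
      rw [if_pos hh, ihh true (k : Int) (pvNameOf (PySem.Str.strip l)) (pvIndentOf l)]
      have hhdr : pvHdrs (((k : Int), l) :: PySem.List.enumerate d' ((k : Int) + 1)) =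
          ((k : Int), pvNameOf (PySem.Str.strip l), pvIndentOf l) ::
            pvHdrs (PySem.List.enumerate d' ((k : Int) + 1)) := by
        simp_all [pvHdrs, pvIsHeader]
      have hlimk : pvLimit (L.length : Int) (((k : Int), l) :: PySem.List.enumerate d' ((k : Int) + 1)) =
          (k : Int) := by
        simp_all [pvLimit, pvIsHeader]
      rw [hhdr, pvBRes_cons, hlim, hlimk]
      cases inc <;> simp [hr, pvBFindEnd]
    · -- not a header
      have hlen : ((k : Int) + 1) + (d'.length : Int) ≤ (L.length : Int) := by
        have : d'.length = L.length - (k + 1) := by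
          rw [← hd']; simp
        omega
      have hge : (k : Int) + 1 ≤ pvLimit (L.length : Int) (PySem.List.enumerate d' ((k : Int) + 1)) :=
        pvLimit_ge (L.length : Int) d' ((k : Int) + 1) (by simpa using hlen)
      have hrange : PySem.List.pyRange (k : Int)
            (pvLimit (L.length : Int) (PySem.List.enumerate d' ((k : Int) + 1))) 1 =
          (k : Int) :: PySem.List.pyRange ((k : Int) + 1)
            (pvLimit (L.length : Int) (PySem.List.enumerate d' ((k : Int) + 1))) 1 :=
        PySem.List.pyRange_one_cons (by omega)
      have hlimc : pvLimit (L.length : Int) (((k : Int), l) :: PySem.List.enumerate d' ((k : Int) + 1)) =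
          pvLimit (L.length : Int) (PySem.List.enumerate d' ((k : Int) + 1)) := by
        simp_all [pvLimit, pvIsHeader]
      have hhdrc : pvHdrs (((k : Int), l) :: PySem.List.enumerate d' ((k : Int) + 1)) =
          pvHdrs (PySem.List.enumerate d' ((k : Int) + 1)) := by
        simp_all [pvHdrs, pvIsHeader]
      by_cases ht : pvTerm l il = true
      · cases inc
        · -- not in a class: line is simply skipped
          simp only [pvAEmit, pvIsHeader] at hh ⊢
          rw [if_neg hh]
          simp only [Bool.false_and, Bool.false_eq_true, if_false]
          rw [ihh false cs cc il, hhdrc]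
          simp
        · -- in a class, terminator: emit and leave class mode
          simp only [pvAEmit, pvIsHeader] at hh ⊢
          rw [if_neg hh]
          simp only [ht, Bool.true_and, if_pos]
          rw [ihh false 0 "" il, hlimc, hhdrc, hrange, pvBFindEnd_cons, hgetD, if_pos ht]
          simp
      · -- neither header nor terminator: state unchanged
        simp only [pvAEmit, pvIsHeader] at hh ⊢
        rw [if_neg hh]
        have hf : (inc && pvTerm l il) = false := by simp [ht]
        simp only [hf, Bool.false_eq_true, if_false]
        rw [ihh inc cs cc il, hlimc, hhdrc]
        cases inc
        · simp
        · rw [hrange, pvBFindEnd_cons, hgetD, if_neg ht]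

lemma pvAlt_eq (content : String) :
    extract_class_definitions_alt content =
      pvBRes (pvSplit content "\n")
        (((pvSplit content "\n").length : Int))
        (pvHdrs (PySem.List.enumerate (pvSplit content "\n") 0)) := by
  simp [extract_class_definitions_alt, pvBRes, pvHdrs, pvIsHeader, PySem.List.len_eq]

-- ===== VERDICT (by name: the statement is the Claim_ definition above) =====
theorem extract_class_definitions_spec : Claim_equal_extract_class_definitions := by
  intro content _
  unfold Spec_extract_class_definitions
  set L := pvSplit content "\n" with hL
  have hA : extract_class_definitions content =
      pvPost ((L.length : Int)) (pvALoop (PySem.List.enumerate L 0) ([], false, 0, "", 0)) := by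
    simp only [extract_class_definitions, pvPost, PySem.List.len_eq, ← hL]
  rw [hA, pvALoop_emit]
  have hm := pvMain L L 0 (by omega) (by simp) false 0 "" 0
  simp only [Nat.cast_zero] at hm
  rw [hm, pvAlt_eq, ← hL]
  simp
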